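-- pv_equiv track=rewrite | github.com/GAIMHE/visu_streamlit | src/visu2/overview_concentration.py | _rank_bucket_label
-- ===== SOURCE A (Python) =====
-- import math
--
-- DECILE_LABELS = (
--     "Top 10%",
--     "10-20%",
--     "20-30%",
--     "30-40%",
--     "40-50%",
--     "50-60%",
--     "60-70%",
--     "70-80%",
--     "80-90%",
--     "90-100%",
-- )
--
-- def _rank_bucket_label(rank: int, total_entities: int) -> str:
--     if total_entities <= 0:
--         return DECILE_LABELS[-1]
--     for idx, label in enumerate(DECILE_LABELS, start=1):
--         cutoff = max(1, int(math.ceil(total_entities * idx / 10.0)))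
--         if rank <= cutoff:
--             return label
--     return DECILE_LABELS[-1]
-- ===== SOURCE B (Python) =====
-- DECILE_LABELS = (
--     "Top 10%",
--     "10-20%",
--     "20-30%",
--     "30-40%",
--     "40-50%",
--     "50-60%",
--     "60-70%",
--     "70-80%",
--     "80-90%",
--     "90-100%",
-- )
--
-- def _rank_bucket_label(rank: int, total_entities: int) -> str:
--     # Closed form: the loop's answer is the smallest idx in 1..10 with
--     # total_entities * idx > 10 * (rank - 1), i.e. floor(10*(rank-1)/total)+1, clamped to 1..10.
--     if total_entities <= 0:
--         return DECILE_LABELS[-1]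
--     idx = (10 * (rank - 1)) // total_entities + 1
--     return DECILE_LABELS[min(10, max(1, idx)) - 1]
-- ===== Notes on version B (the rewrite author's own statement) =====
-- stated objective: simpler
-- what changed: Replaces the 10-iteration linear scan over decile cutoffs with a direct closed-form bucket index (10*(rank-1))//total + 1 clamped to 1..10, used to index DECILE_LABELS once.
import Mathlib
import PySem

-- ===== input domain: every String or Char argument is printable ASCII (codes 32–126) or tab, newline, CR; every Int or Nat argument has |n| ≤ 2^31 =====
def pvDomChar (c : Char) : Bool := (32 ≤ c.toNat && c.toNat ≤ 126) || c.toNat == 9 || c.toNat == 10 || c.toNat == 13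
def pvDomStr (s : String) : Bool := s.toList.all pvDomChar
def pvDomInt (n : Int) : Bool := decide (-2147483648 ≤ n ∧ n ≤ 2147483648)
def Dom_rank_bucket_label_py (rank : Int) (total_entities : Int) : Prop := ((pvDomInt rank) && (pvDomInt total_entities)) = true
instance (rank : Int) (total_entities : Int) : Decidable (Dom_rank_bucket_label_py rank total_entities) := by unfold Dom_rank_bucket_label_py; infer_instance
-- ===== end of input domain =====

set_option maxHeartbeats 1000000


-- B replaces A's 10-iteration cutoff scan by a closed-form clamped index into the label list (simpler).

-- ===== PORT A =====
def decileLabels : List String :=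
  ["Top 10%", "10-20%", "20-30%", "30-40%", "40-50%", "50-60%",
   "60-70%", "70-80%", "80-90%", "90-100%"]

-- int(math.ceil(m / 10.0)) as exact integer ceiling: on the stated domain (|n| ≤ 2^31)
-- the float product and division in Python are exact, so this is faithful there.
def pyCeil10 (m : Int) : Int := -(PySem.Int.floordiv (-m) 10)

-- the `for idx, label in enumerate(DECILE_LABELS, start=1)` loop; cutoff computation inlined
def rbLoop (rank total : Int) : List (Int × String) → String
  | [] => "90-100%"  -- fall-through: return DECILE_LABELS[-1]
  | (idx, label) :: rest =>
      if rank ≤ max 1 (pyCeil10 (total * idx)) then label else rbLoop rank total rest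

def rank_bucket_label_py (rank : Int) (total_entities : Int) : String :=
  if total_entities ≤ 0 then (PySem.List.pyGet? decileLabels (-1)).getD ""
  else rbLoop rank total_entities ((PySem.List.pyRange 1 11 1).zip decileLabels)

-- ===== PORT B =====
def rank_bucket_label_py_alt (rank : Int) (total_entities : Int) : String :=
  if total_entities ≤ 0 then (PySem.List.pyGet? decileLabels (-1)).getD ""
  else
    let idx := PySem.Int.floordiv (10 * (rank - 1)) total_entities + 1
    (PySem.List.pyGet? decileLabels (min 10 (max 1 idx) - 1)).getD ""  -- index always in 0..9

-- ===== PRECONDITION & SPEC =====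
def Spec_rank_bucket_label_py (rank : Int) (total_entities : Int) (out : String) : Prop := out = rank_bucket_label_py_alt rank total_entities
instance (rank : Int) (total_entities : Int) (out : String) : Decidable (Spec_rank_bucket_label_py rank total_entities out) := by unfold Spec_rank_bucket_label_py; infer_instance

-- ===== CLAIM (what is proved, stated in full; the proofs are below) =====
def Claim_equal_rank_bucket_label_py : Prop := ∀ (rank : Int) (total_entities : Int), Dom_rank_bucket_label_py rank total_entities → Spec_rank_bucket_label_py rank total_entities (rank_bucket_label_py rank total_entities)

-- ===== LEMMAS AND PROOFS =====

theorem pyCeil10_eq (m : Int) : pyCeil10 m = -(-m / 10) := by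
  rw [pyCeil10, PySem.Int.floordiv_eq_ediv_of_pos (by norm_num)]

theorem rbLoop_skip (rank total idx : Int) (label : String) (rest : List (Int × String))
    (h : ¬ rank ≤ max 1 (pyCeil10 (total * idx))) :
    rbLoop rank total ((idx, label) :: rest) = rbLoop rank total rest := by
  simp [rbLoop, h]

theorem rbLoop_hit (rank total idx : Int) (label : String) (rest : List (Int × String))
    (h : rank ≤ max 1 (pyCeil10 (total * idx))) :
    rbLoop rank total ((idx, label) :: rest) = label := by
  simp [rbLoop, h]

theorem rbl_eq (rank total : Int) :
    rank_bucket_label_py rank total = rank_bucket_label_py_alt rank total := by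
  by_cases ht : total ≤ 0
  · simp [rank_bucket_label_py, rank_bucket_label_py_alt, ht]
  · push_neg at ht
    have hlist : (PySem.List.pyRange 1 11 1).zip decileLabels =
        [((1:Int),"Top 10%"), (2,"10-20%"), (3,"20-30%"), (4,"30-40%"), (5,"40-50%"),
         (6,"50-60%"), (7,"60-70%"), (8,"70-80%"), (9,"80-90%"), (10,"90-100%")] := by decide
    rw [rank_bucket_label_py, rank_bucket_label_py_alt, if_neg (by omega), if_neg (by omega), hlist]
    set a : Int := 10 * (rank - 1) with ha
    set q : Int := PySem.Int.floordiv a total with hqdef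
    have hq : q = a / total := by
      rw [hqdef, PySem.Int.floordiv_eq_ediv_of_pos ht]
    have h1 : total * q ≤ a ∧ a < total * q + total := by
      have hde := Int.ediv_add_emod a total
      rw [← hq] at hde
      have := Int.emod_nonneg a (by omega : total ≠ 0)
      have := Int.emod_lt_of_pos a ht
      omega
    obtain ⟨h1, h2⟩ := h1
    clear_value q
    clear hq hqdef
    show rbLoop rank total _ = (PySem.List.pyGet? decileLabels (min 10 (max 1 (q + 1)) - 1)).getD ""
    by_cases hq0 : q ≤ 0
    · have hnp : total * q ≤ 0 := mul_nonpos_of_nonneg_of_nonpos (le_of_lt ht) hq0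
      rw [show min 10 (max 1 (q + 1)) - 1 = 0 from by omega]
      rw [rbLoop_hit _ _ _ _ _ (by rw [pyCeil10_eq]; omega)]
      rfl
    · by_cases hq10 : 10 ≤ q
      · have hge : total * 10 ≤ total * q := mul_le_mul_of_nonneg_left hq10 (le_of_lt ht)
        rw [show min 10 (max 1 (q + 1)) - 1 = 9 from by omega]
        repeat rw [rbLoop_skip _ _ _ _ _ (by rw [pyCeil10_eq]; omega)]
        rfl
      · push_neg at hq0 hq10
        rw [show min 10 (max 1 (q + 1)) - 1 = q from by omega]
        interval_cases q <;>
          · repeat rw [rbLoop_skip _ _ _ _ _ (by rw [pyCeil10_eq]; omega)]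
            rw [rbLoop_hit _ _ _ _ _ (by rw [pyCeil10_eq]; omega)]
            rfl

-- ===== VERDICT (by name: the statement is the Claim_ definition above) =====
theorem rank_bucket_label_py_spec : Claim_equal_rank_bucket_label_py := by
  intro rank total _
  unfold Spec_rank_bucket_label_py
  exact rbl_eq rank total
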